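-- pv_equiv track=rewrite | github.com/haomengqi00709/EI_RAG | src/retrieve.py | _lost_in_middle_reorder
-- ===== SOURCE A (Python) =====
-- def _lost_in_middle_reorder(results: list[dict]) -> list[dict]:
--     """
--     #16: Reorder so the most relevant chunks are at the start and end of the
--     context window, with less relevant chunks in the middle.
--     LLMs attend more strongly to positions at the edges (Liu et al. 2023).
--
--     Example for 5 results [r1..r5] → [r1, r3, r5, r4, r2]
--     """
--     if len(results) <= 2:
--         return results
--
--     reordered = [None] * len(results)
--     left, right = 0, len(results) - 1
--     for i, r in enumerate(results):
--         if i % 2 == 0: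
--             reordered[left] = r
--             left += 1
--         else:
--             reordered[right] = r
--             right -= 1
--     return reordered
-- ===== SOURCE B (Python) =====
-- def _lost_in_middle_reorder(results: list[dict]) -> list[dict]:
--     if len(results) <= 2:
--         return results
--     return results[0::2] + results[1::2][::-1]
-- ===== Notes on version B (the rewrite author's own statement) =====
-- stated objective: simpler
-- what changed: Replaces the in-place two-pointer placement loop over a preallocated None list by parity slicing: even-indexed items in order followed by the odd-indexed items reversed.
import Mathlib
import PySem

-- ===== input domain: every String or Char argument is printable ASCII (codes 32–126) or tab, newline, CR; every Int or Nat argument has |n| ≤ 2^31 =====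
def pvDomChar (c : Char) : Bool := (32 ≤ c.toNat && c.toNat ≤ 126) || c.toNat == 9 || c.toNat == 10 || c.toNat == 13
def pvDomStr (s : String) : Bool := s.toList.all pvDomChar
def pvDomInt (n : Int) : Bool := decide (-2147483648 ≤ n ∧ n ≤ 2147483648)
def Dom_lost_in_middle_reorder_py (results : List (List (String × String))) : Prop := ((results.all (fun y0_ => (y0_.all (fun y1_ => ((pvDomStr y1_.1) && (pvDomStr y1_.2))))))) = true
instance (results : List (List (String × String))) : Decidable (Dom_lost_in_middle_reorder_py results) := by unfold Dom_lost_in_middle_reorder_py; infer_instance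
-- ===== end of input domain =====

-- B changes the structure only (parity slices + one reverse instead of a two-pointer in-place fill);
-- same return value, same cost class. A's len<=2 branch returns the argument itself (aliasing); B does too.

-- ===== PORT A =====
-- The loop `for i, r in enumerate(results)` with state (reordered, left, right);
-- `reordered = [None] * len(results)` is a List (Option _), filled with `some`.
def pvLoopA {α : Type} : List α → Nat → List (Option α) → Nat → Nat → List (Option α)
  | [], _, re, _, _ => re
  | x :: rest, i, re, l, r =>
      if i % 2 == 0 then pvLoopA rest (i + 1) (re.set l (some x)) (l + 1) r
      else pvLoopA rest (i + 1) (re.set r (some x)) l (r - 1)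

def lost_in_middle_reorder_py (results : List (List (String × String))) : List (List (String × String)) :=
  if results.length ≤ 2 then results
  else
    -- after the loop every slot is `some`; `.getD []` only strips the `some` wrapper
    (pvLoopA results 0 (List.replicate results.length none) 0 (results.length - 1)).map
      (fun o => o.getD [])

-- ===== PORT B =====
-- hand port of the step-2 slice `xs[0::2]` over a full list (exact: PySem slices have no step)
def pvStride2 {α : Type} : List α → List α
  | [] => []
  | [x] => [x]
  | x :: _ :: rest => x :: pvStride2 rest

def lost_in_middle_reorder_py_alt (results : List (List (String × String))) : List (List (String × String)) :=
  if results.length ≤ 2 then results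
  else pvStride2 results ++ (pvStride2 (results.drop 1)).reverse
      -- results[0::2] + results[1::2][::-1]; results[1::2] = (results.drop 1)[0::2]

-- ===== PRECONDITION & SPEC =====
def Spec_lost_in_middle_reorder_py (results : List (List (String × String))) (out : List (List (String × String))) : Prop := out = lost_in_middle_reorder_py_alt results
instance (results : List (List (String × String))) (out : List (List (String × String))) : Decidable (Spec_lost_in_middle_reorder_py results out) := by unfold Spec_lost_in_middle_reorder_py; infer_instance

-- ===== CLAIM (what is proved, stated in full; the proofs are below) =====
def Claim_equal_lost_in_middle_reorder_py : Prop := ∀ (results : List (List (String × String))), Dom_lost_in_middle_reorder_py results → Spec_lost_in_middle_reorder_py results (lost_in_middle_reorder_py results)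

-- ===== LEMMAS AND PROOFS =====

theorem pvStride2_cons {α : Type} (a : α) (t : List α) :
    pvStride2 (a :: t) = a :: pvStride2 (t.drop 1) := by
  cases t <;> simp [pvStride2]

-- A's two-pointer loop fills [l, r] with the even-indexed items ascending from l and the
-- odd-indexed items descending from r; the rest of `re` is untouched.
theorem pvLoopA_spec {α : Type} (xs : List α) : ∀ (i l r : Nat) (re : List (Option α)),
    i % 2 = 0 → r + 1 = l + xs.length → l + xs.length ≤ re.length →
    pvLoopA xs i re l r =
      re.take l ++ (pvStride2 xs).map some ++ ((pvStride2 (xs.drop 1)).map some).reverse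
        ++ re.drop (r + 1) := by
  induction xs using pvStride2.induct with
  | case1 =>
      intro i l r re _ hr _
      simp only [List.length_nil] at hr
      simp [pvLoopA, pvStride2]
      have : r + 1 = l := by omega
      rw [this, List.take_append_drop]
  | case2 x =>
      intro i l r re hi hr hlen
      simp only [List.length_cons, List.length_nil] at hr hlen
      have hlr : r = l := by omega
      have hl : l < re.length := by omega
      simp [pvLoopA, pvStride2, hi, hlr]
      rw [List.set_eq_take_cons_drop _ hl]
  | case3 x y rest ih =>
      intro i l r re hi hr hlen
      simp only [List.length_cons] at hr hlen
      have hi1 : (i + 1) % 2 ≠ 0 := by omega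
      have hi2 : (i + 2) % 2 = 0 := by omega
      have hlr : l + 1 + rest.length = r := by omega
      have hrlen : r < re.length := by omega
      have hllen : l < re.length := by omega
      simp only [pvLoopA, hi, beq_self_eq_true, if_true]
      rw [if_neg (by simpa using hi1)]
      rw [ih (i + 2) (l + 1) (r - 1) ((re.set l (some x)).set r (some y)) hi2
            (by omega) (by simp; omega)]
      have hdrop : (r - 1) + 1 = r := by omega
      rw [hdrop]
      -- take (l+1) of the doubly-set list = re.take l ++ [some x]
      have htake : ((re.set l (some x)).set r (some y)).take (l + 1)
          = re.take l ++ [some x] := by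
        rw [List.take_set, List.set_eq_of_length_le (by simp; omega), List.take_set]
        have h1 : (re.take (l + 1)).set l (some x)
            = (re.take (l + 1)).take l ++ some x :: (re.take (l + 1)).drop (l + 1) := by
          exact List.set_eq_take_cons_drop _ (by simp; omega)
        rw [h1, List.take_take, List.drop_take]
        simp
      -- drop r of the doubly-set list = some y :: re.drop (r+1)
      have hdrop2 : ((re.set l (some x)).set r (some y)).drop r
          = some y :: re.drop (r + 1) := by
        rw [List.drop_set, if_neg (by omega), List.drop_set, if_pos (by omega)]
        have h2 : ((re.drop r).set (r - r) (some y))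
            = (re.drop r).take 0 ++ some y :: (re.drop r).drop 1 := by
          have : r - r = 0 := by omega
          rw [this]
          exact List.set_eq_take_cons_drop _ (by simp; omega)
        rw [h2]
        simp [List.drop_drop]
      rw [htake, hdrop2]
      simp only [show (x :: y :: rest).drop 1 = y :: rest from rfl, pvStride2_cons y rest]
      simp [pvStride2, List.append_assoc]

-- ===== VERDICT (by name: the statement is the Claim_ definition above) =====
theorem lost_in_middle_reorder_py_spec : Claim_equal_lost_in_middle_reorder_py := by
  intro results _
  unfold Spec_lost_in_middle_reorder_py lost_in_middle_reorder_py lost_in_middle_reorder_py_alt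
  by_cases h : results.length ≤ 2
  · simp [h]
  · simp only [h, if_false]
    have hlen : 1 ≤ results.length := by omega
    rw [pvLoopA_spec results 0 0 (results.length - 1) (List.replicate results.length none)
          rfl (by omega) (by simp)]
    have : results.length - 1 + 1 = results.length := by omega
    rw [this]
    simp [List.map_map]
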